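-- pv_equiv track=rewrite | github.com/16lemoing/automated-essay-scoring | src/data.py | get_set_scores
-- ===== SOURCE A (Python) =====
-- def get_set_scores(essay_scores, essay_sets):
--     set_scores = {i + 1:[] for i in range(8)}
--     for score, set_id in zip(essay_scores, essay_sets):
--         if not score in set_scores[set_id]:
--             set_scores[set_id].append(score)
--     for set_id in set_scores:
--         set_scores[set_id] = sorted(set_scores[set_id])
--     return set_scores
-- ===== SOURCE B (Python) =====
-- def get_set_scores(essay_scores, essay_sets):
--     pairs = list(zip(essay_scores, essay_sets))
--     return {k: sorted({s for s, sid in pairs if sid == k}) for k in range(1, 9)}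
-- ===== Notes on version B (the rewrite author's own statement) =====
-- stated objective: simpler
-- what changed: B transposes the iteration: instead of A's single pass that mutates a dict of buckets with an inner membership scan, B loops over the eight keys and builds each entry directly as sorted({score | its set_id == k}) from the zipped pairs, with no accumulator dict and no mutation.
import Mathlib
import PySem

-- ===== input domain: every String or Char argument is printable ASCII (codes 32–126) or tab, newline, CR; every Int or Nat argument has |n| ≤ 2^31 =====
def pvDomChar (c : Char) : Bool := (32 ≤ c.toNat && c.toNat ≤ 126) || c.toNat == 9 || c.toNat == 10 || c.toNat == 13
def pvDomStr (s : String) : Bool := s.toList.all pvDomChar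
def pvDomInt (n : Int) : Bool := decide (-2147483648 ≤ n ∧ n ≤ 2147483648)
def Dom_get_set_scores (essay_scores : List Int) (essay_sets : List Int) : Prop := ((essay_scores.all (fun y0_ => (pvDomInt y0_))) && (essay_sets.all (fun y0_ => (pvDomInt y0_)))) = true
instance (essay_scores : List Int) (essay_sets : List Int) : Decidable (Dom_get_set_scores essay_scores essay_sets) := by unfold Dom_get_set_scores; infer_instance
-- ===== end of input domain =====

-- B transposes the iteration: per key 1..8 it builds sorted({score | set_id == k}) directly
-- from the zipped pairs, with no accumulator dict and no mutation (objective: simpler).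

-- ===== PORT A =====
-- the dict literal {i+1: [] for i in range(8)}
def pvInit : PySem.Dict Int (List Int) :=
  (PySem.List.pyRange 0 8 1).foldl (fun d i => d.insert (i + 1) []) PySem.Dict.empty

-- Python raises KeyError when set_id is not a key 1..8; Pre_ excludes exactly those inputs,
-- so Dict.modify's (then never used) [] default is exact on Pre_.
def get_set_scores (essay_scores : List Int) (essay_sets : List Int) : List (Int × List Int) :=
  let d1 :=
    (List.zip essay_scores essay_sets).foldl
      (fun d p => d.modify p.2 [] (fun l => if p.1 ∈ l then l else l ++ [p.1])) pvInit
  let d2 := d1.keys.foldl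
      (fun d k => d.insert k (PySem.List.sorted (d.getD k []) (fun x => x) false)) d1
  d2.items

-- ===== PORT B =====
-- the Python set comprehension is PySem.Set.ofList of the filtered scores; sorted() makes the
-- result independent of the set's iteration order, so this is exact.
def get_set_scores_alt (essay_scores : List Int) (essay_sets : List Int) : List (Int × List Int) :=
  let pairs := List.zip essay_scores essay_sets
  (PySem.List.pyRange 1 9 1).map (fun k =>
    (k, PySem.List.sorted
          (PySem.Set.ofList ((pairs.filter (fun p => p.2 == k)).map Prod.fst))
          (fun x => x) false))

-- ===== PRECONDITION & SPEC =====
-- Pre_ excludes exactly the inputs where some zipped set_id is outside the dict keys 1..8: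
-- there A raises KeyError.
def Pre_get_set_scores (essay_scores : List Int) (essay_sets : List Int) : Prop :=
  ∀ p ∈ List.zip essay_scores essay_sets, 1 ≤ p.2 ∧ p.2 ≤ 8
instance (essay_scores : List Int) (essay_sets : List Int) : Decidable (Pre_get_set_scores essay_scores essay_sets) := by unfold Pre_get_set_scores; infer_instance

def pvWitness_get_set_scores : List Int × List Int := ([3, 1, 3, 2], [1, 1, 1, 2])

def Spec_get_set_scores (essay_scores : List Int) (essay_sets : List Int) (out : List (Int × List Int)) : Prop := out = get_set_scores_alt essay_scores essay_sets
instance (essay_scores : List Int) (essay_sets : List Int) (out : List (Int × List Int)) : Decidable (Spec_get_set_scores essay_scores essay_sets out) := by unfold Spec_get_set_scores; infer_instance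

-- ===== CLAIM (what is proved, stated in full; the proofs are below) =====
def Claim_equal_get_set_scores : Prop := ∀ (essay_scores : List Int) (essay_sets : List Int), Dom_get_set_scores essay_scores essay_sets → Pre_get_set_scores essay_scores essay_sets → Spec_get_set_scores essay_scores essay_sets (get_set_scores essay_scores essay_sets)

-- ===== LEMMAS AND PROOFS =====

-- the value at key c after a modify-loop is a fold over the pairs keyed at c
theorem pv_getD_foldl_modify {α κ ν : Type} [BEq κ] [LawfulBEq κ] [DecidableEq κ]
    (key : α → κ) (f : α → ν → ν) (d0 : ν) :
    ∀ (l : List α) (d : PySem.Dict κ ν) (c : κ),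
      (l.foldl (fun d a => d.modify (key a) d0 (f a)) d).getD c d0
        = (l.filter (fun a => key a == c)).foldl (fun v a => f a v) (d.getD c d0) := by
  intro l
  induction l with
  | nil => intro d c; rfl
  | cons a t ih =>
      intro d c
      simp only [List.foldl_cons, List.filter_cons]
      by_cases h : key a = c
      · simp [h, ih]
      · have hb : (key a == c) = false := by simp [h]
        have hne : c ≠ key a := fun hc => h hc.symm
        simp [hb, ih, PySem.Dict.getD_modify, hne]

-- the value at key c after the sort-in-place loop over a nodup key list
theorem pv_getD_foldl_insert_sorted :
    ∀ (ks : List Int) (d : PySem.Dict Int (List Int)) (c : Int), ks.Nodup →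
      (ks.foldl (fun d k => d.insert k (PySem.List.sorted (d.getD k []) (fun x => x) false)) d).getD c []
        = if c ∈ ks then PySem.List.sorted (d.getD c []) (fun x => x) false else d.getD c [] := by
  intro ks
  induction ks with
  | nil => intro d c _; simp
  | cons k0 t ih =>
      intro d c hnd
      simp only [List.foldl_cons]
      rw [ih _ _ hnd.of_cons]
      by_cases h : c = k0
      · subst h
        have hct : c ∉ t := (List.nodup_cons.mp hnd).1
        simp [hct, PySem.Dict.getD_insert_self]
      · by_cases ht : c ∈ t <;> simp [PySem.Dict.getD_insert, ht, h]

-- items of a nodup-key dict are its keys paired with their values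
theorem pv_items_eq_keys_map {κ ν : Type} [BEq κ] [LawfulBEq κ]
    (d : PySem.Dict κ ν) (h : d.keys.Nodup) (d0 : ν) :
    d.items = d.keys.map (fun k => (k, d.getD k d0)) := by
  have hk : d.keys = d.items.map Prod.fst := by simp [PySem.Dict.keys]
  rw [hk, List.map_map]
  have : ∀ p ∈ d.items, ((fun k => (k, d.getD k d0)) ∘ Prod.fst) p = id p := by
    intro p hp
    have hpv : d.getD p.1 d0 = p.2 :=
      PySem.Dict.getD_of_mem_items d (k := p.1) (v := p.2) (by simpa using hp) h d0
    simp [hpv]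
  rw [List.map_congr_left this, List.map_id]

-- a Set.update by elements already present is the identity
theorem pv_update_of_subset {κ : Type} [BEq κ] [LawfulBEq κ] [DecidableEq κ] (s xs : List κ)
    (h : ∀ x ∈ xs, x ∈ s) : PySem.Set.update s xs = s := by
  rw [PySem.Set.update_eq_append_filter]
  have hf : (PySem.Set.ofList xs).filter (fun y => !(PySem.Set.contains s y)) = [] := by
    rw [List.filter_eq_nil_iff]
    intro y hy
    have hys : y ∈ s := h y ((PySem.Set.mem_ofList xs y).mp hy)
    simp [PySem.Set.contains, hys]
  rw [hf]; simp

-- accumulating with the membership guard is building the set of the accumulated list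
theorem pv_foldl_guard_eq_ofList {α : Type} [BEq α] [LawfulBEq α] [DecidableEq α] (l : List α) :
    l.foldl (fun v x => if x ∈ v then v else v ++ [x]) [] = PySem.Set.ofList l := by
  have hf : (fun (v : List α) (x : α) => if x ∈ v then v else v ++ [x]) = PySem.Set.add := by
    funext v x; simp [PySem.Set.add, PySem.Set.contains]
  rw [hf, PySem.Set.ofList_eq_foldl]

theorem pvInit_keys : pvInit.keys = [1,2,3,4,5,6,7,8] := by decide

theorem pvInit_getD (k : Int) : pvInit.getD k [] = [] := by
  have : pvInit = PySem.Dict.mk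
      [((1:Int),([]:List Int)),(2,[]),(3,[]),(4,[]),(5,[]),(6,[]),(7,[]),(8,[])] := by decide
  rw [this]
  simp only [PySem.Dict.getD_eq_get?_getD, PySem.Dict.get?_mk_cons]
  split_ifs <;> rfl

-- ===== VERDICT (by name: the statement is the Claim_ definition above) =====
theorem get_set_scores_spec : Claim_equal_get_set_scores := by
  intro scores sets _ hpre
  unfold Spec_get_set_scores
  simp only [get_set_scores, get_set_scores_alt]
  set zl := List.zip scores sets with hzl
  have hmemK : ∀ p ∈ zl, p.2 ∈ ([1,2,3,4,5,6,7,8] : List Int) := by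
    intro p hp
    have := hpre p hp
    simp only [List.mem_cons]
    omega
  have hKnodup : ([1,2,3,4,5,6,7,8] : List Int).Nodup := by decide
  have hkeysA : (zl.foldl (fun d p => d.modify p.2 [] (fun l => if p.1 ∈ l then l else l ++ [p.1])) pvInit).keys = [1,2,3,4,5,6,7,8] := by
    rw [PySem.Dict.keys_foldl_modify_key, pvInit_keys]
    apply pv_update_of_subset
    intro x hx
    obtain ⟨p, hp, rfl⟩ := List.mem_map.mp hx
    exact hmemK p hp
  set dA := zl.foldl (fun d p => d.modify p.2 [] (fun l => if p.1 ∈ l then l else l ++ [p.1])) pvInit with hdA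
  -- per-key value of the first loop: the set of the filtered scores in first-occurrence order
  have hval : ∀ c : Int, dA.getD c []
      = PySem.Set.ofList ((zl.filter (fun p => p.2 == c)).map Prod.fst) := by
    intro c
    rw [hdA,
        pv_getD_foldl_modify (fun p : Int × Int => p.2) (fun p l => if p.1 ∈ l then l else l ++ [p.1]) [],
        pvInit_getD]
    have h1 : (zl.filter (fun p => p.2 == c)).foldl (fun v p => if p.1 ∈ v then v else v ++ [p.1]) []
        = ((zl.filter (fun p => p.2 == c)).map Prod.fst).foldl (fun v x => if x ∈ v then v else v ++ [x]) [] := by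
      rw [List.foldl_map]
    rw [h1, pv_foldl_guard_eq_ofList]
  -- second loop of A: sort each bucket in place
  set dF := dA.keys.foldl (fun d k => d.insert k (PySem.List.sorted (d.getD k []) (fun x => x) false)) dA with hdF
  have hkeysF : dF.keys = [1,2,3,4,5,6,7,8] := by
    rw [hdF, PySem.Dict.keys_foldl_insert, hkeysA]
    apply pv_update_of_subset
    intro x hx; exact hx
  have hvalF : ∀ c ∈ ([1,2,3,4,5,6,7,8] : List Int),
      dF.getD c [] = PySem.List.sorted (dA.getD c []) (fun x => x) false := by
    intro c hc
    rw [hdF, pv_getD_foldl_insert_sorted dA.keys dA c (hkeysA ▸ hKnodup), hkeysA]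
    simp [hc]
  rw [pv_items_eq_keys_map dF (hkeysF ▸ hKnodup) [], hkeysF]
  have hrange : PySem.List.pyRange 1 9 1 = ([1,2,3,4,5,6,7,8] : List Int) := by decide
  rw [hrange]
  apply List.map_congr_left
  intro k hk
  rw [hvalF k hk, hval k]
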